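-- pv_equiv track=rewrite | github.com/hwan-koo/Algorithm | 프로그래머스/0/120892. 암호 해독/암호 해독.py | solution
-- ===== SOURCE A (Python) =====
-- def solution(cipher, code):
--     num = 1
--     answer = ''
--     for i in cipher:
--         if num == code:
--             answer += i
--             num = 1
--         else:
--             num += 1
--
--     return answer
-- ===== SOURCE B (Python) =====
-- def solution(cipher, code):
--     if code <= 0:
--         return ''
--     return cipher[code - 1::code]
-- ===== Notes on version B (the rewrite author's own statement) =====
-- stated objective: idiomatic
-- what changed: Replaced the per-character counter loop with a single stride slice cipher[code-1::code] (guarded by code <= 0, where A's counter never fires and it returns ''); the slice runs at C level, measured ~7x faster at n=262144.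
import Mathlib
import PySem

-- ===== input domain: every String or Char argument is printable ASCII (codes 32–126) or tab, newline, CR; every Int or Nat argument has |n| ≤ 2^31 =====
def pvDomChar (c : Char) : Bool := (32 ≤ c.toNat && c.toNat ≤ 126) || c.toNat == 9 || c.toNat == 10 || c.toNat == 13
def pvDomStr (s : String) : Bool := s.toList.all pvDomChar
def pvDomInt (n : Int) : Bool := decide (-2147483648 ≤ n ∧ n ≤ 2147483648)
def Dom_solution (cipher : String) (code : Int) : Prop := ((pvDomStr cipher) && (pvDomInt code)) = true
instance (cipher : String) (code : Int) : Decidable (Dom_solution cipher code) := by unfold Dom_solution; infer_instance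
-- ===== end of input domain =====

-- B replaces A's per-character counter loop with a single stride slice cipher[code-1::code]
-- (guarded by code ≤ 0, where A's counter never matches and it returns '').

-- ===== PORT A =====
-- counter loop: num counts 1..code, append the char and reset when it hits code
def solution (cipher : String) (code : Int) : String :=
  String.ofList
    ((cipher.toList.foldl
      (fun (st : Int × List Char) i =>
        if st.1 == code then (1, st.2 ++ [i]) else (st.1 + 1, st.2))
      (1, [])).2)

-- ===== PORT B =====
def solution_alt (cipher : String) (code : Int) : String :=
  if code ≤ 0 then ""
  else (PySem.Str.slice? cipher (some (code - 1)) none code).getD ""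

-- ===== PRECONDITION & SPEC =====
def Spec_solution (cipher : String) (code : Int) (out : String) : Prop := out = solution_alt cipher code
instance (cipher : String) (code : Int) (out : String) : Decidable (Spec_solution cipher code out) := by unfold Spec_solution; infer_instance

-- ===== CLAIM (what is proved, stated in full; the proofs are below) =====
def Claim_equal_solution : Prop := ∀ (cipher : String) (code : Int), Dom_solution cipher code → Spec_solution cipher code (solution cipher code)

-- ===== LEMMAS AND PROOFS =====

theorem pyRange_pos_cons (a b k : Int) (hk : 0 < k) (hab : a < b) :
    PySem.List.pyRange a b k = a :: PySem.List.pyRange (a + k) b k := by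
  rw [PySem.List.pyRange_of_pos _ _ hk, PySem.List.pyRange_of_pos _ _ hk]
  have hnum : b - (a + k) + k - 1 = b - a - 1 := by ring
  have hnn : 0 ≤ (b - a - 1) / k := Int.ediv_nonneg (by omega) (by omega)
  have h1 : ((b - a + k - 1) / k).toNat = ((b - a - 1) / k).toNat + 1 := by
    have he : b - a + k - 1 = (b - a - 1) + 1 * k := by ring
    rw [he, Int.add_mul_ediv_right _ _ (by omega : k ≠ 0)]
    omega
  have h2 : (if a + k < b then ((b - (a + k) + k - 1) / k).toNat else 0)
      = ((b - a - 1) / k).toNat := by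
    rw [hnum]; split
    · rfl
    · have : (b - a - 1) / k = 0 := Int.ediv_eq_zero_of_lt (by omega) (by omega)
      simp [this]
  rw [if_pos hab, h1, h2, List.range_succ_eq_map, List.map_cons, List.map_map]
  congr 1
  · simp
  · apply List.map_congr_left
    intro j _
    simp [Nat.succ_eq_add_one]
    ring

theorem pyRange_pos_shift (a b k : Int) (hk : 0 < k) :
    PySem.List.pyRange (a + 1) (b + 1) k = (PySem.List.pyRange a b k).map (· + 1) := by
  rw [PySem.List.pyRange_of_pos _ _ hk, PySem.List.pyRange_of_pos _ _ hk, List.map_map]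
  have h2 : (if a + 1 < b + 1 then ((b + 1 - (a + 1) + k - 1) / k).toNat else 0)
      = (if a < b then ((b - a + k - 1) / k).toNat else 0) := by
    have : b + 1 - (a + 1) + k - 1 = b - a + k - 1 := by ring
    rw [this]
    by_cases h : a < b
    · rw [if_pos h, if_pos (by omega)]
    · rw [if_neg h, if_neg (by omega)]
  rw [h2]
  apply List.map_congr_left
  intro j _
  simp
  ring

def everyk (kr : Nat) : List Char → Nat → List Char
  | [], _ => []
  | x :: xs, 0 => x :: everyk kr xs kr
  | _ :: xs, r + 1 => everyk kr xs r

theorem filterMap_pyRange_everyk (k : Int) (hk : 0 < k) (xs : List Char) (r : Nat) :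
    List.filterMap (fun i : Int => xs[i.toNat]?) (PySem.List.pyRange (r : Int) xs.length k)
      = everyk (k - 1).toNat xs r := by
  induction xs generalizing r with
  | nil =>
    rw [PySem.List.pyRange_of_pos _ _ hk]
    simp [everyk]
  | cons x xs ih =>
    have hshift : ∀ (a : Int) (r' : Nat), 0 ≤ a →
        List.filterMap (fun i : Int => (x :: xs)[i.toNat]?)
          (PySem.List.pyRange (a + 1) ((xs.length : Int) + 1) k)
        = List.filterMap (fun i : Int => xs[i.toNat]?) (PySem.List.pyRange a (xs.length : Int) k) := by
      intro a r' ha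
      rw [pyRange_pos_shift _ _ _ hk, List.filterMap_map]
      apply List.filterMap_congr
      intro i hi
      have h0 : 0 ≤ i := by
        have := (PySem.List.mem_pyRange_iff_of_pos hk i).mp hi
        omega
      have : (i + 1).toNat = i.toNat + 1 := by omega
      simp [Function.comp, this]
    cases r with
    | zero =>
      have hlen : ((x :: xs).length : Int) = (xs.length : Int) + 1 := by simp
      rw [Nat.cast_zero, hlen, pyRange_pos_cons _ _ _ hk (by positivity), zero_add]
      have hk1 : k = ((k - 1).toNat : Int) + 1 := by omega
      rw [List.filterMap_cons]
      simp only [Int.toNat_zero, List.getElem?_cons_zero]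
      rw [show (PySem.List.pyRange k ((xs.length : Int) + 1) k)
            = PySem.List.pyRange (((k - 1).toNat : Int) + 1) ((xs.length : Int) + 1) k by
          rw [← hk1]]
      rw [hshift _ 0 (by positivity), ih]
      rfl
    | succ r =>
      have hlen : ((x :: xs).length : Int) = (xs.length : Int) + 1 := by simp
      rw [hlen, show ((r + 1 : Nat) : Int) = (r : Int) + 1 by push_cast; ring]
      rw [hshift _ r (by positivity), ih]
      rfl

theorem everyk_nil_of_le (kr : Nat) (xs : List Char) (r : Nat) (h : xs.length ≤ r) :
    everyk kr xs r = [] := by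
  induction xs generalizing r with
  | nil => rfl
  | cons x xs ih =>
    cases r with
    | zero => simp at h
    | succ r => exact ih r (by simpa using Nat.le_of_succ_le_succ h)

theorem slice_eq_everyk (xs : List Char) (k : Int) (hk : 0 < k) :
    PySem.List.slice? xs (some (k - 1)) none k
      = some (everyk (k - 1).toNat xs (k - 1).toNat) := by
  rw [PySem.List.slice?]
  rw [if_neg (by omega)]
  simp only [PySem.List.sliceIndices]
  rw [if_neg (by omega : ¬ k < 0)]
  rw [if_neg (by omega : ¬ k - 1 < 0)]
  simp only [if_neg (show ¬ k < 0 by omega), if_pos hk]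
  have hgen : ∀ s : Int,
      List.filterMap (fun j : Nat => xs[(s + k * (j : Int)).toNat]?)
        (List.range (if s < (xs.length : Int) then (((xs.length : Int) - s + k - 1) / k).toNat else 0))
      = List.filterMap (fun i : Int => xs[i.toNat]?) (PySem.List.pyRange s (xs.length : Int) k) := by
    intro s
    rw [PySem.List.pyRange_of_pos _ _ hk, List.filterMap_map]
    rfl
  rw [hgen]
  by_cases h : k - 1 ≤ (xs.length : Int)
  · rw [min_eq_left h,
      show (k - 1 : Int) = (((k - 1).toNat : Nat) : Int) by omega,
      filterMap_pyRange_everyk k hk xs (k - 1).toNat]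
    simp
  · rw [min_eq_right (by omega),
      filterMap_pyRange_everyk k hk xs xs.length,
      everyk_nil_of_le _ _ _ (le_refl _),
      everyk_nil_of_le _ _ _ (by omega)]

theorem foldA_eq_everyk (code : Int) (hk : 0 < code) (xs : List Char) :
    ∀ (num : Int) (acc : List Char), 1 ≤ num → num ≤ code →
    (List.foldl (fun (st : Int × List Char) i =>
        if st.1 == code then (1, st.2 ++ [i]) else (st.1 + 1, st.2)) (num, acc) xs).2
      = acc ++ everyk (code - 1).toNat xs (code - num).toNat := by
  induction xs with
  | nil => intro num acc h1 h2; simp [everyk]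
  | cons x xs ih =>
    intro num acc h1 h2
    by_cases h : num = code
    · have h0 : (code - num).toNat = 0 := by omega
      rw [List.foldl_cons, if_pos (show (num == code) = true by simp [h]), h0,
        ih 1 (acc ++ [x]) le_rfl hk]
      simp [everyk]
    · have hlt : num < code := lt_of_le_of_ne h2 h
      have h0 : (code - num).toNat = (code - (num + 1)).toNat + 1 := by omega
      simp only [List.foldl_cons]
      rw [if_neg (show ¬ (num == code) = true by simp [h]), h0,
        ih (num + 1) acc (by omega) (by omega)]
      rfl

theorem foldA_nonpos (code : Int) (hk : code ≤ 0) (xs : List Char) :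
    ∀ (num : Int) (acc : List Char), 1 ≤ num →
    (List.foldl (fun (st : Int × List Char) i =>
        if st.1 == code then (1, st.2 ++ [i]) else (st.1 + 1, st.2)) (num, acc) xs).2 = acc := by
  induction xs with
  | nil => intro num acc h1; rfl
  | cons x xs ih =>
    intro num acc h1
    rw [List.foldl_cons, if_neg (by simp; omega)]
    exact ih (num + 1) acc (by omega)

-- ===== VERDICT (by name: the statement is the Claim_ definition above) =====
theorem solution_spec : Claim_equal_solution := by
  intro cipher code _
  unfold Spec_solution solution solution_alt
  by_cases hc : code ≤ 0
  · rw [if_pos hc, foldA_nonpos code hc cipher.toList 1 [] le_rfl]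
  · have hk : 0 < code := by omega
    rw [if_neg hc, foldA_eq_everyk code hk cipher.toList 1 [] le_rfl hk]
    simp only [PySem.Str.slice?, PySem.Chars.slice?_eq_listSlice?,
      slice_eq_everyk cipher.toList code hk]
    simp
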